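-- pv_equiv track=rewrite | github.com/SeeSense-AK/dublin-dashboard | utils/geocoding_utils.py | _build_location_name
-- ===== SOURCE A (Python) =====
-- def _build_location_name(address: dict) -> str:
--     """Build a concise location name from address components"""
--     parts = []
--
--     # Priority order for location naming
--     if address.get('road'):
--         parts.append(address['road'])
--
--     if address.get('suburb'):
--         parts.append(address['suburb'])
--     elif address.get('neighbourhood'):
--         parts.append(address['neighbourhood'])
--
--     if address.get('city'):
--         parts.append(address['city'])
--     elif address.get('town'):
--         parts.append(address['town'])
--
--     if not parts:
--         # Fallback to any available location
--         for key in ['hamlet', 'village', 'county', 'state']: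
--             if address.get(key):
--                 parts.append(address[key])
--                 break
--
--     return ', '.join(parts) if parts else 'Unknown Location'
-- ===== SOURCE B (Python) =====
-- _SLOT = {'road': (0, 0),
--          'suburb': (1, 0), 'neighbourhood': (1, 1),
--          'city': (2, 0), 'town': (2, 1),
--          'hamlet': (3, 0), 'village': (3, 1), 'county': (3, 2), 'state': (3, 3)}
--
--
-- def _build_location_name(address: dict) -> str:
--     """Build a concise location name from address components"""
--     # One pass over the items: keep, for each output slot, the truthy value of
--     # the highest-priority (lowest rank) key seen; slot 3 is the fallback tier.
--     best = {}
--     for key, value in address.items():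
--         if value and key in _SLOT:
--             slot, prio = _SLOT[key]
--             if slot not in best or prio < best[slot][0]:
--                 best[slot] = (prio, value)
--     parts = [best[s][1] for s in (0, 1, 2) if s in best]
--     if not parts and 3 in best:
--         parts = [best[3][1]]
--     return ', '.join(parts) if parts else 'Unknown Location'
-- ===== Notes on version B (the rewrite author's own statement) =====
-- stated objective: alternative
-- what changed: Replaces A's nine per-key dict lookups arranged in an if/elif cascade plus a separate fallback loop by a single pass over the address items that buckets each truthy value into an output slot via a (slot, priority) rank table, keeping the lowest-rank value per slot, then assembles the parts from the slots.
import Mathlib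
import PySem

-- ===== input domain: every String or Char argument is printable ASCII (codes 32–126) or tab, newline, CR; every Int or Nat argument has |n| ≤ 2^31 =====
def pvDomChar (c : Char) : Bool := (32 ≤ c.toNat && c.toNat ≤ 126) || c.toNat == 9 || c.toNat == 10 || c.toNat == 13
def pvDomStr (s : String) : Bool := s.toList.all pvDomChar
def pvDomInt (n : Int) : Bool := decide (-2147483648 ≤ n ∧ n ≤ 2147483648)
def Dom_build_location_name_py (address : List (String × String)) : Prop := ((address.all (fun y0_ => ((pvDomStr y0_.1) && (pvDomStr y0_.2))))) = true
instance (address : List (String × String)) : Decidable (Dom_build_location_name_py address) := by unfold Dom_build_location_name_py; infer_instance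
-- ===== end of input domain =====

-- B replaces A's per-key lookup cascade by a single pass over the address items with a
-- (slot, priority) rank table (objective: alternative); return value only, no mutation.

-- ===== PORT A =====
-- A's fallback loop 'for key in [...]: if address.get(key): parts.append(address[key]); break'
def pvFallbackA (g : String → String) : List String → List String
  | [] => []
  | k :: ks => if g k ≠ "" then [g k] else pvFallbackA g ks

def build_location_name_py (address : List (String × String)) : String :=
  let d := PySem.Dict.ofList address
  -- address.get(k) is falsy iff the key is absent or its value is ""; then address[k] = d.getD k ""
  let g : String → String := fun k => d.getD k ""
  let parts : List String := []
  let parts := if g "road" ≠ "" then parts ++ [g "road"] else parts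
  let parts := if g "suburb" ≠ "" then parts ++ [g "suburb"]
               else if g "neighbourhood" ≠ "" then parts ++ [g "neighbourhood"] else parts
  let parts := if g "city" ≠ "" then parts ++ [g "city"]
               else if g "town" ≠ "" then parts ++ [g "town"] else parts
  let parts := if parts = [] then pvFallbackA g ["hamlet", "village", "county", "state"] else parts
  if parts = [] then "Unknown Location" else PySem.Str.join ", " parts

-- ===== PORT B =====
-- the literal dict _SLOT, used only via 'key in _SLOT' / '_SLOT[key]', as a partial function
def pvSlotOf (k : String) : Option (Nat × Nat) :=
  if k = "road" then some (0, 0)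
  else if k = "suburb" then some (1, 0)
  else if k = "neighbourhood" then some (1, 1)
  else if k = "city" then some (2, 0)
  else if k = "town" then some (2, 1)
  else if k = "hamlet" then some (3, 0)
  else if k = "village" then some (3, 1)
  else if k = "county" then some (3, 2)
  else if k = "state" then some (3, 3)
  else none

-- the loop body: 'if value and key in _SLOT: … if slot not in best or prio < best[slot][0]: best[slot] = (prio, value)'
def pvStep (best : PySem.Dict Nat (Nat × String)) (kv : String × String) : PySem.Dict Nat (Nat × String) :=
  if kv.2 ≠ "" then
    match pvSlotOf kv.1 with
    | some (slot, prio) =>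
        match best.get? slot with
        | none => best.insert slot (prio, kv.2)
        | some (q, _) => if prio < q then best.insert slot (prio, kv.2) else best
    | none => best
  else best

def build_location_name_py_alt (address : List (String × String)) : String :=
  let d := PySem.Dict.ofList address
  let best := d.items.foldl pvStep PySem.Dict.empty
  -- '[best[s][1] for s in (0, 1, 2) if s in best]'
  let parts := ([0, 1, 2] : List Nat).filterMap (fun s => (best.get? s).map Prod.snd)
  -- 'if not parts and 3 in best: parts = [best[3][1]]'
  let parts := if parts = [] then
                 match best.get? 3 with
                 | some pv => [pv.2]
                 | none => parts
               else parts
  if parts = [] then "Unknown Location" else PySem.Str.join ", " parts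

-- ===== PRECONDITION & SPEC =====
def Spec_build_location_name_py (address : List (String × String)) (out : String) : Prop := out = build_location_name_py_alt address
instance (address : List (String × String)) (out : String) : Decidable (Spec_build_location_name_py address out) := by unfold Spec_build_location_name_py; infer_instance

-- ===== CLAIM (what is proved, stated in full; the proofs are below) =====
def Claim_equal_build_location_name_py : Prop := ∀ (address : List (String × String)), Dom_build_location_name_py address → Spec_build_location_name_py address (build_location_name_py address)

-- ===== LEMMAS AND PROOFS =====

-- first-match lookup on an association list, defaulting to ""
def pvLD (l : List (String × String)) (k : String) : String :=
  match l with
  | [] => ""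
  | (k', v) :: t => if k' = k then v else pvLD t k

-- 'earlier entry wins ties, lower priority wins' combination
def pvLeftmin (pv : Nat × String) (y : Option (Nat × String)) : Option (Nat × String) :=
  match y with
  | none => some pv
  | some (q, w) => if q < pv.1 then some (q, w) else some pv

def pvComb (x y : Option (Nat × String)) : Option (Nat × String) :=
  match x with
  | none => y
  | some pv => pvLeftmin pv y

-- the per-slot result of scanning a list of items
def pvSpec (s : Nat) : List (String × String) → Option (Nat × String)
  | [] => none
  | (k, v) :: l =>
      if v ≠ "" then
        match pvSlotOf k with
        | some (s', p) => if s' = s then pvLeftmin (p, v) (pvSpec s l) else pvSpec s l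
        | none => pvSpec s l
      else pvSpec s l

theorem pvComb_none (x : Option (Nat × String)) : pvComb x none = x := by
  cases x <;> rfl

theorem pvLeftmin_leftmin (p q : Nat) (v w : String) (y : Option (Nat × String)) :
    pvLeftmin (q, w) (pvLeftmin (p, v) y) =
      if p < q then pvLeftmin (p, v) y else pvLeftmin (q, w) y := by
  rcases y with _ | ⟨y1, y2⟩ <;> by_cases h1 : p < q <;>
    simp [pvLeftmin, h1] <;> split_ifs <;> simp_all <;> omega

-- the fold invariant: the slot-s entry of the dict after the scan
theorem foldl_pvStep_get? (l : List (String × String)) :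
    ∀ (b : PySem.Dict Nat (Nat × String)) (s : Nat),
      (l.foldl pvStep b).get? s = pvComb (b.get? s) (pvSpec s l) := by
  induction l with
  | nil => intro b s; simp [pvSpec, pvComb_none]
  | cons kv t ih =>
    intro b s
    obtain ⟨k, v⟩ := kv
    rw [List.foldl_cons, ih]
    by_cases hv : v = ""
    · simp [pvStep, pvSpec, hv]
    · rcases hk : pvSlotOf k with _ | ⟨s', p⟩
      · simp [pvStep, pvSpec, hv, hk]
      · by_cases hs : s' = s
        · subst hs
          rcases hb : b.get? s' with _ | ⟨q, w⟩
          · simp [pvStep, pvSpec, hv, hk, hb, PySem.Dict.get?_insert, pvComb]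
          · by_cases hpq : p < q
            · simp [pvStep, pvSpec, hv, hk, hb, hpq, PySem.Dict.get?_insert, pvComb,
                    pvLeftmin_leftmin]
            · simp [pvStep, pvSpec, hv, hk, hb, hpq, pvComb, pvLeftmin_leftmin]
        · rcases hb : b.get? s' with _ | ⟨q, w⟩ <;>
            simp [pvStep, pvSpec, hv, hk, hb, hs, PySem.Dict.get?_insert, Ne.symm hs] <;>
            split_ifs <;> simp [PySem.Dict.get?_insert, Ne.symm hs]
  
theorem pvLD_of_not_mem (l : List (String × String)) (k : String)
    (h : k ∉ l.map Prod.fst) : pvLD l k = "" := by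
  induction l with
  | nil => rfl
  | cons kv t ih =>
    simp only [List.map_cons, List.mem_cons] at h
    push_neg at h
    simpa [pvLD, Ne.symm h.1] using ih h.2

-- the four slot results, characterised as A-style lookup cascades
theorem pvSpec_cascade (l : List (String × String)) (h : (l.map Prod.fst).Nodup) :
    pvSpec 0 l = (if pvLD l "road" ≠ "" then some (0, pvLD l "road") else none) ∧
    pvSpec 1 l = (if pvLD l "suburb" ≠ "" then some (0, pvLD l "suburb")
                  else if pvLD l "neighbourhood" ≠ "" then some (1, pvLD l "neighbourhood")
                  else none) ∧
    pvSpec 2 l = (if pvLD l "city" ≠ "" then some (0, pvLD l "city")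
                  else if pvLD l "town" ≠ "" then some (1, pvLD l "town") else none) ∧
    pvSpec 3 l = (if pvLD l "hamlet" ≠ "" then some (0, pvLD l "hamlet")
                  else if pvLD l "village" ≠ "" then some (1, pvLD l "village")
                  else if pvLD l "county" ≠ "" then some (2, pvLD l "county")
                  else if pvLD l "state" ≠ "" then some (3, pvLD l "state") else none) := by
  induction l with
  | nil => simp [pvSpec, pvLD]
  | cons kv t ih =>
    obtain ⟨k, v⟩ := kv
    rw [List.map_cons, List.nodup_cons] at h
    obtain ⟨i0, i1, i2, i3⟩ := ih h.2
    have hnm := h.1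
    by_cases h1 : k = "road"
    · subst h1
      have hz : pvLD t "road" = "" := pvLD_of_not_mem t _ hnm
      refine ⟨?_, ?_, ?_, ?_⟩ <;>
        simp [pvSpec, pvSlotOf, pvLD, pvLeftmin, i0, i1, i2, i3, hz] <;>
        split_ifs <;> simp_all [pvLeftmin]
    · by_cases h2 : k = "suburb"
      · subst h2
        have hz : pvLD t "suburb" = "" := pvLD_of_not_mem t _ hnm
        refine ⟨?_, ?_, ?_, ?_⟩ <;>
          simp [pvSpec, pvSlotOf, pvLD, pvLeftmin, i0, i1, i2, i3, hz] <;>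
          split_ifs <;> simp_all [pvLeftmin]
      · by_cases h3 : k = "neighbourhood"
        · subst h3
          have hz : pvLD t "neighbourhood" = "" := pvLD_of_not_mem t _ hnm
          refine ⟨?_, ?_, ?_, ?_⟩ <;>
            simp [pvSpec, pvSlotOf, pvLD, pvLeftmin, i0, i1, i2, i3, hz] <;>
            split_ifs <;> simp_all [pvLeftmin]
        · by_cases h4 : k = "city"
          · subst h4
            have hz : pvLD t "city" = "" := pvLD_of_not_mem t _ hnm
            refine ⟨?_, ?_, ?_, ?_⟩ <;>
              simp [pvSpec, pvSlotOf, pvLD, pvLeftmin, i0, i1, i2, i3, hz] <;>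
              split_ifs <;> simp_all [pvLeftmin]
          · by_cases h5 : k = "town"
            · subst h5
              have hz : pvLD t "town" = "" := pvLD_of_not_mem t _ hnm
              refine ⟨?_, ?_, ?_, ?_⟩ <;>
                simp [pvSpec, pvSlotOf, pvLD, pvLeftmin, i0, i1, i2, i3, hz] <;>
                split_ifs <;> simp_all [pvLeftmin]
            · by_cases h6 : k = "hamlet"
              · subst h6
                have hz : pvLD t "hamlet" = "" := pvLD_of_not_mem t _ hnm
                refine ⟨?_, ?_, ?_, ?_⟩ <;>
                  simp [pvSpec, pvSlotOf, pvLD, pvLeftmin, i0, i1, i2, i3, hz] <;>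
                  split_ifs <;> simp_all [pvLeftmin]
              · by_cases h7 : k = "village"
                · subst h7
                  have hz : pvLD t "village" = "" := pvLD_of_not_mem t _ hnm
                  refine ⟨?_, ?_, ?_, ?_⟩ <;>
                    simp [pvSpec, pvSlotOf, pvLD, pvLeftmin, i0, i1, i2, i3, hz] <;>
                    split_ifs <;> simp_all [pvLeftmin]
                · by_cases h8 : k = "county"
                  · subst h8
                    have hz : pvLD t "county" = "" := pvLD_of_not_mem t _ hnm
                    refine ⟨?_, ?_, ?_, ?_⟩ <;>
                      simp [pvSpec, pvSlotOf, pvLD, pvLeftmin, i0, i1, i2, i3, hz] <;>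
                      split_ifs <;> simp_all [pvLeftmin]
                  · by_cases h9 : k = "state"
                    · subst h9
                      have hz : pvLD t "state" = "" := pvLD_of_not_mem t _ hnm
                      refine ⟨?_, ?_, ?_, ?_⟩ <;>
                        simp [pvSpec, pvSlotOf, pvLD, pvLeftmin, i0, i1, i2, i3, hz] <;>
                        split_ifs <;> simp_all [pvLeftmin]
                    · refine ⟨?_, ?_, ?_, ?_⟩ <;>
                        simp [pvSpec, pvSlotOf, pvLD, i0, i1, i2, i3,
                              h1, h2, h3, h4, h5, h6, h7, h8, h9]

-- the dict lookup A uses is first-match lookup on the items list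
theorem getD_eq_pvLD (d : PySem.Dict String String) (k : String) :
    d.getD k "" = pvLD d.items k := by
  rw [PySem.Dict.getD_eq_get?_getD]
  have h : ∀ l : List (String × String), ((PySem.Dict.mk l).get? k).getD "" = pvLD l k := by
    intro l
    induction l with
    | nil => rfl
    | cons kv t ih =>
      obtain ⟨k', v⟩ := kv
      rw [PySem.Dict.get?_mk_cons]
      by_cases hk : k' = k <;> simp [pvLD, hk, ih]
  exact h d.items

-- ===== VERDICT (by name: the statement is the Claim_ definition above) =====
set_option maxHeartbeats 1000000 in
theorem build_location_name_py_spec : Claim_equal_build_location_name_py := by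
  intro address _
  unfold Spec_build_location_name_py build_location_name_py build_location_name_py_alt
  have hnd : (((PySem.Dict.ofList address : PySem.Dict String String)).items.map Prod.fst).Nodup :=
    PySem.Dict.nodup_keys_ofList address
  obtain ⟨c0, c1, c2, c3⟩ := pvSpec_cascade (PySem.Dict.ofList address).items hnd
  have hget : ∀ s : Nat,
      (((PySem.Dict.ofList address : PySem.Dict String String)).items.foldl pvStep
          PySem.Dict.empty).get? s = pvSpec s (PySem.Dict.ofList address).items := by
    intro s
    rw [foldl_pvStep_get? _ PySem.Dict.empty s, PySem.Dict.get?_empty]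
    rfl
  simp only [hget, c0, c1, c2, c3, pvFallbackA, getD_eq_pvLD, List.filterMap_cons,
    List.filterMap_nil]
  generalize pvLD (PySem.Dict.ofList address).items "road" = vr
  generalize pvLD (PySem.Dict.ofList address).items "suburb" = vs
  generalize pvLD (PySem.Dict.ofList address).items "neighbourhood" = vn
  generalize pvLD (PySem.Dict.ofList address).items "city" = vc
  generalize pvLD (PySem.Dict.ofList address).items "town" = vt
  generalize pvLD (PySem.Dict.ofList address).items "hamlet" = vh
  generalize pvLD (PySem.Dict.ofList address).items "village" = vv
  generalize pvLD (PySem.Dict.ofList address).items "county" = vo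
  generalize pvLD (PySem.Dict.ofList address).items "state" = vst
  by_cases hr : vr = "" <;>
  by_cases hs : vs = "" <;>
  by_cases hn : vn = "" <;>
  by_cases hc : vc = "" <;>
  by_cases ht : vt = "" <;>
    simp [hr, hs, hn, hc, ht] <;>
  by_cases hh : vh = "" <;>
  by_cases hv2 : vv = "" <;>
  by_cases ho : vo = "" <;>
  by_cases hst : vst = "" <;>
    simp [hh, hv2, ho, hst]
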